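-- pv_equiv track=rewrite | github.com/vilalali/2023811006_Assignment2 | sourav.py | prepare_ngram_data
-- ===== SOURCE A (Python) =====
-- def prepare_ngram_data(sentences, word_to_index, n):
--     """Prepares n-gram data from sentences."""
--     ngrams = []
--     for sentence in sentences:
--         indexed_sentence = [word_to_index.get(word, word_to_index['<UNK>']) for word in sentence]
--         if len(indexed_sentence) < n:
--             continue
--         for i in range(n - 1, len(indexed_sentence)):
--             context = indexed_sentence[i - (n - 1):i]
--             target = indexed_sentence[i]
--             ngrams.append((context, target))
--     return ngrams
-- ===== SOURCE B (Python) =====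
-- def prepare_ngram_data(sentences, word_to_index, n):
--     """Prepares n-gram data from sentences (rolling-context single pass)."""
--     ngrams = []
--     if n < 1:
--         return ngrams
--     for sentence in sentences:
--         indexed = [word_to_index.get(word, word_to_index['<UNK>']) for word in sentence]
--         context = indexed[:n - 1]
--         for target in indexed[n - 1:]:
--             ngrams.append((context, target))
--             context = (context + [target])[1:]
--     return ngrams
-- ===== Notes on version B (the rewrite author's own statement) =====
-- stated objective: alternative
-- what changed: B replaces A's per-index range loop with its per-iteration context slice indexed_sentence[i-(n-1):i] by a single rolling-context pass per sentence that maintains the current context window incrementally ((context + [target])[1:]), and guards n < 1 up front instead of relying on negative-index slicing.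
-- intended difference: For n <= 0 with a nonempty sentence list, A returns wraparound pairs produced by negative-index slicing (e.g. ([], last_word_index) entries, the last one twice), while B returns [], the intended value since there are no n-grams of nonpositive order. — e.g. on prepare_ngram_data([["a"]], [("a", 1), ("<UNK>", 0)], 0): A returns [([], 1), ([], 1)], B returns []
import Mathlib
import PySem

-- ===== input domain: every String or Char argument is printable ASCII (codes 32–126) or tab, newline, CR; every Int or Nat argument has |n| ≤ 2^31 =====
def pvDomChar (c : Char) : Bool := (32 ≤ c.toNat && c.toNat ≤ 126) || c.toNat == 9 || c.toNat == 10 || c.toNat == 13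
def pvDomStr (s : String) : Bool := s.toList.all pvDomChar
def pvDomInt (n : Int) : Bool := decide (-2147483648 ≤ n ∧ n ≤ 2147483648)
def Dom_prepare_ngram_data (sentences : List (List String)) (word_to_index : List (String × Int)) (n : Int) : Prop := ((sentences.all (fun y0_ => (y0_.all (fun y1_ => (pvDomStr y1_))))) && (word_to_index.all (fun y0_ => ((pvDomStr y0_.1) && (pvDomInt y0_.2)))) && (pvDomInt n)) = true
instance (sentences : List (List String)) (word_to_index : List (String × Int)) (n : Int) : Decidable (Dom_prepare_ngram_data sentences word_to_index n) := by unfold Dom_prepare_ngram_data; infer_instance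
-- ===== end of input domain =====

-- B replaces A's per-index range loop and slicing with a single rolling-context pass per
-- sentence (objective: alternative); for n ≤ 0, where A's negative-index slicing returns
-- wraparound pairs, B returns no n-grams (see D_ below).

-- ===== PORT A =====
-- shared line of both Pythons: word_to_index.get(word, word_to_index['<UNK>']).
-- The default word_to_index['<UNK>'] raises KeyError when absent; modelled by .getD 0,
-- exact under Pre_ (which guarantees the key whenever any lookup happens).
def pvWordIdx (word_to_index : List (String × Int)) (word : String) : Int :=
  PySem.Dict.getD (PySem.Dict.mk word_to_index) word
    ((PySem.Dict.get? (PySem.Dict.mk word_to_index) "<UNK>").getD 0)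

def prepare_ngram_data (sentences : List (List String)) (word_to_index : List (String × Int)) (n : Int) : List (List Int × Int) :=
  sentences.foldl (fun ngrams sentence =>
    let indexed_sentence := sentence.map (fun word => pvWordIdx word_to_index word)
    if (indexed_sentence.length : Int) < n then ngrams
    else
      (PySem.List.pyRange (n - 1) (indexed_sentence.length : Int) 1).foldl (fun ngrams i =>
        let context := PySem.List.slice indexed_sentence (some (i - (n - 1))) (some i)
        -- indexed_sentence[i]: pyGetD is exact under Pre_ (the index is in range there)
        let target := PySem.List.pyGetD indexed_sentence i 0
        ngrams ++ [(context, target)]) ngrams) []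

-- ===== PORT B =====
def prepare_ngram_data_alt (sentences : List (List String)) (word_to_index : List (String × Int)) (n : Int) : List (List Int × Int) :=
  if n < 1 then []
  else
    sentences.foldl (fun ngrams sentence =>
      let indexed := sentence.map (fun word => pvWordIdx word_to_index word)
      -- indexed[:n-1] / indexed[n-1:] with n-1 ≥ 0: exactly take/drop
      let context := indexed.take (n - 1).toNat
      ((indexed.drop (n - 1).toNat).foldl
        (fun st target => (st.1 ++ [(st.2, target)], (st.2 ++ [target]).drop 1))
        (ngrams, context)).1) []

-- ===== PRECONDITION & SPEC =====
-- Pre_ excludes exactly the inputs where Python A raises: a KeyError when some sentence is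
-- nonempty but '<UNK>' is not a key of word_to_index, and (for n ≤ 0) an IndexError when
-- some sentence has length ≤ -n (the target index n-1 then falls below -len).
def Pre_prepare_ngram_data (sentences : List (List String)) (word_to_index : List (String × Int)) (n : Int) : Prop :=
  ("<UNK>" ∈ word_to_index.map Prod.fst ∨ ∀ s ∈ sentences, s = []) ∧
  (∀ s ∈ sentences, -n < (s.length : Int))
instance (sentences : List (List String)) (word_to_index : List (String × Int)) (n : Int) : Decidable (Pre_prepare_ngram_data sentences word_to_index n) := by unfold Pre_prepare_ngram_data; infer_instance
def pvWitness_prepare_ngram_data : List (List String) × (List (String × Int)) × Int :=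
  ([["a", "b"], ["c"]], [("<UNK>", 0), ("a", 1)], 2)

-- On n ≤ 0 with a nonempty sentence list, A returns pairs produced by negative-index
-- wraparound slicing (e.g. ([], last-word) entries), while B returns [] — the intended
-- value, since there are no n-grams of nonpositive order.
def D_prepare_ngram_data (sentences : List (List String)) (word_to_index : List (String × Int)) (n : Int) : Prop :=
  n ≤ 0 ∧ sentences ≠ []
instance (sentences : List (List String)) (word_to_index : List (String × Int)) (n : Int) : Decidable (D_prepare_ngram_data sentences word_to_index n) := by unfold D_prepare_ngram_data; infer_instance

def Spec_prepare_ngram_data (sentences : List (List String)) (word_to_index : List (String × Int)) (n : Int) (out : List (List Int × Int)) : Prop := ¬ D_prepare_ngram_data sentences word_to_index n → out = prepare_ngram_data_alt sentences word_to_index n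
instance (sentences : List (List String)) (word_to_index : List (String × Int)) (n : Int) (out : List (List Int × Int)) : Decidable (Spec_prepare_ngram_data sentences word_to_index n out) := by unfold Spec_prepare_ngram_data; infer_instance

def pvDiffWitness_prepare_ngram_data : List (List String) × (List (String × Int)) × Int :=
  ([["a"]], [("a", 1), ("<UNK>", 0)], 0)
def pvDiffWitnessOut_prepare_ngram_data : (List (List Int × Int)) × (List (List Int × Int)) :=
  ([([], 1), ([], 1)], [])

-- ===== CLAIM (what is proved, stated in full; the proofs are below) =====
def Claim_unchanged_prepare_ngram_data : Prop := ∀ (sentences : List (List String)) (word_to_index : List (String × Int)) (n : Int), Dom_prepare_ngram_data sentences word_to_index n → Pre_prepare_ngram_data sentences word_to_index n → Spec_prepare_ngram_data sentences word_to_index n (prepare_ngram_data sentences word_to_index n)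
def Claim_changed_prepare_ngram_data : Prop := Dom_prepare_ngram_data (pvDiffWitness_prepare_ngram_data.1) (pvDiffWitness_prepare_ngram_data.2.1) (pvDiffWitness_prepare_ngram_data.2.2) ∧ Pre_prepare_ngram_data (pvDiffWitness_prepare_ngram_data.1) (pvDiffWitness_prepare_ngram_data.2.1) (pvDiffWitness_prepare_ngram_data.2.2) ∧ D_prepare_ngram_data (pvDiffWitness_prepare_ngram_data.1) (pvDiffWitness_prepare_ngram_data.2.1) (pvDiffWitness_prepare_ngram_data.2.2) ∧ prepare_ngram_data (pvDiffWitness_prepare_ngram_data.1) (pvDiffWitness_prepare_ngram_data.2.1) (pvDiffWitness_prepare_ngram_data.2.2) = pvDiffWitnessOut_prepare_ngram_data.1 ∧ prepare_ngram_data_alt (pvDiffWitness_prepare_ngram_data.1) (pvDiffWitness_prepare_ngram_data.2.1) (pvDiffWitness_prepare_ngram_data.2.2) = pvDiffWitnessOut_prepare_ngram_data.2 ∧ pvDiffWitnessOut_prepare_ngram_data.1 ≠ pvDiffWitnessOut_prepare_ngram_data.2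
def Claim_exact_prepare_ngram_data : Prop := ∀ (sentences : List (List String)) (word_to_index : List (String × Int)) (n : Int), Dom_prepare_ngram_data sentences word_to_index n → Pre_prepare_ngram_data sentences word_to_index n → D_prepare_ngram_data sentences word_to_index n → prepare_ngram_data sentences word_to_index n ≠ prepare_ngram_data_alt sentences word_to_index n

-- ===== LEMMAS AND PROOFS =====

-- B's inner loop written as structural recursion
def pvEmit (ctx : List Int) : List Int → List (List Int × Int)
  | [] => []
  | t :: rest => (ctx, t) :: pvEmit ((ctx ++ [t]).drop 1) rest

-- A's per-sentence contribution (proof-side characterisation)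
def pvGA (idx : List Int) (n : Int) : List (List Int × Int) :=
  if (idx.length : Int) < n then []
  else (PySem.List.pyRange (n - 1) (idx.length : Int) 1).map
    (fun i => (PySem.List.slice idx (some (i - (n - 1))) (some i), PySem.List.pyGetD idx i 0))

theorem pv_inner_fold (rest : List Int) : ∀ (acc : List (List Int × Int)) (ctx : List Int),
    (rest.foldl (fun st target => (st.1 ++ [(st.2, target)], (st.2 ++ [target]).drop 1))
      (acc, ctx)).1 = acc ++ pvEmit ctx rest := by
  induction rest with
  | nil => intro acc ctx; simp [pvEmit]
  | cons t rest ih =>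
    intro acc ctx
    simp only [List.foldl_cons, pvEmit]
    rw [ih]
    simp

theorem pv_core (k : Nat) : ∀ (idx : List Int) (m j : Nat), idx.length = m + j + k →
    pvEmit ((idx.drop j).take m) (idx.drop (m + j)) =
      (PySem.List.pyRange ((m : Int) + (j : Int)) (idx.length : Int) 1).map
        (fun i => (PySem.List.slice idx (some (i - (m : Int))) (some i),
                   PySem.List.pyGetD idx i 0)) := by
  induction k with
  | zero =>
    intro idx m j hlen
    have h1 : idx.drop (m + j) = [] := List.drop_of_length_le (by omega)
    have h2 : PySem.List.pyRange ((m : Int) + (j : Int)) (idx.length : Int) 1 = [] :=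
      PySem.List.pyRange_one_eq_nil (by omega)
    rw [h1, h2]
    rfl
  | succ k ih =>
    intro idx m j hlen
    have hmj : m + j < idx.length := by omega
    rw [List.drop_eq_getElem_cons hmj]
    have hctx : (idx.drop j).take m ++ [idx[m + j]] = (idx.drop j).take (m + 1) := by
      have hm : m < (idx.drop j).length := by simp; omega
      rw [List.take_add_one, List.getElem?_drop]
      rw [List.getElem?_eq_getElem (by omega)]
      simp [Nat.add_comm j m]
    have hstep : (((idx.drop j).take m ++ [idx[m + j]]).drop 1) = (idx.drop (j + 1)).take m := by
      rw [hctx, List.drop_take, List.drop_drop]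
      simp
    rw [PySem.List.pyRange_one_cons (by omega)]
    simp only [pvEmit, List.map_cons, hstep]
    have hs : PySem.List.slice idx (some ((m : Int) + (j : Int) - (m : Int))) (some ((m : Int) + (j : Int)))
        = (idx.drop j).take m := by
      have e1 : (m : Int) + (j : Int) - (m : Int) = ((j : Nat) : Int) := by push_cast; ring
      have e2 : (m : Int) + (j : Int) = ((m + j : Nat) : Int) := by push_cast; ring
      rw [e1, e2, PySem.List.slice_natCast]
      congr 1
      omega
    have hg : PySem.List.pyGetD idx ((m : Int) + (j : Int)) 0 = idx[m + j] := by
      have e2 : (m : Int) + (j : Int) = ((m + j : Nat) : Int) := by push_cast; ring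
      rw [e2, PySem.List.pyGetD_natCast]
      simp [List.getD_eq_getElem?_getD, List.getElem?_eq_getElem hmj]
    rw [hs, hg]
    have h4 := ih idx m (j + 1) (by omega)
    have e3 : m + (j + 1) = m + j + 1 := by omega
    have e4 : (m : Int) + ((j + 1 : Nat) : Int) = (m : Int) + (j : Int) + 1 := by push_cast; ring
    rw [e3, e4] at h4
    rw [h4]

-- per-sentence equality, for n ≥ 1
theorem pv_sentence (idx : List Int) (n : Int) (hn : 1 ≤ n) :
    pvEmit (idx.take (n - 1).toNat) (idx.drop (n - 1).toNat) = pvGA idx n := by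
  set m : Nat := (n - 1).toNat with hm
  have hmn : (m : Int) = n - 1 := by omega
  unfold pvGA
  by_cases hlen : (idx.length : Int) < n
  · rw [if_pos hlen, List.drop_of_length_le (by omega)]
    rfl
  · rw [if_neg hlen]
    have h := pv_core (idx.length - m) idx m 0 (by omega)
    simp only [List.drop_zero, Nat.add_zero, Nat.cast_zero, add_zero] at h
    rw [hmn] at h
    exact h

theorem pv_bodyA (idx : List Int) (n : Int) (acc : List (List Int × Int)) :
    (if (idx.length : Int) < n then acc
     else (PySem.List.pyRange (n - 1) (idx.length : Int) 1).foldl (fun ngrams i =>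
        ngrams ++ [(PySem.List.slice idx (some (i - (n - 1))) (some i),
                    PySem.List.pyGetD idx i 0)]) acc)
    = acc ++ pvGA idx n := by
  unfold pvGA
  by_cases hc : (idx.length : Int) < n
  · rw [if_pos hc, if_pos hc, List.append_nil]
  · rw [if_neg hc, if_neg hc, PySem.List.foldl_append_singleton_eq_map]

theorem pv_A_fold (word_to_index : List (String × Int)) (n : Int) :
    ∀ (sentences : List (List String)) (acc : List (List Int × Int)),
    sentences.foldl (fun ngrams sentence =>
      let indexed_sentence := sentence.map (fun word => pvWordIdx word_to_index word)
      if (indexed_sentence.length : Int) < n then ngrams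
      else
        (PySem.List.pyRange (n - 1) (indexed_sentence.length : Int) 1).foldl (fun ngrams i =>
          let context := PySem.List.slice indexed_sentence (some (i - (n - 1))) (some i)
          let target := PySem.List.pyGetD indexed_sentence i 0
          ngrams ++ [(context, target)]) ngrams) acc
    = acc ++ sentences.flatMap (fun sentence => pvGA (sentence.map (fun word => pvWordIdx word_to_index word)) n) := by
  intro sentences
  induction sentences with
  | nil => intro acc; simp
  | cons s rest ih =>
    intro acc
    simp only [List.foldl_cons, List.flatMap_cons]
    rw [pv_bodyA (s.map (fun word => pvWordIdx word_to_index word)) n acc, ih,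
      List.append_assoc]

theorem pv_B_fold (word_to_index : List (String × Int)) (n : Int) :
    ∀ (sentences : List (List String)) (acc : List (List Int × Int)),
    sentences.foldl (fun ngrams sentence =>
      let indexed := sentence.map (fun word => pvWordIdx word_to_index word)
      let context := indexed.take (n - 1).toNat
      ((indexed.drop (n - 1).toNat).foldl
        (fun st target => (st.1 ++ [(st.2, target)], (st.2 ++ [target]).drop 1))
        (ngrams, context)).1) acc
    = acc ++ sentences.flatMap (fun sentence =>
        let idx := sentence.map (fun word => pvWordIdx word_to_index word)
        pvEmit (idx.take (n - 1).toNat) (idx.drop (n - 1).toNat)) := by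
  intro sentences
  induction sentences with
  | nil => intro acc; simp
  | cons s rest ih =>
    intro acc
    simp only [List.foldl_cons, List.flatMap_cons]
    rw [pv_inner_fold, ← List.append_assoc, ← ih]

theorem pv_A_flatMap (sentences : List (List String)) (word_to_index : List (String × Int)) (n : Int) :
    prepare_ngram_data sentences word_to_index n =
      sentences.flatMap (fun sentence => pvGA (sentence.map (fun word => pvWordIdx word_to_index word)) n) := by
  unfold prepare_ngram_data
  exact (pv_A_fold word_to_index n sentences []).trans (List.nil_append _)

theorem pv_B_flatMap (sentences : List (List String)) (word_to_index : List (String × Int)) (n : Int) (hn : ¬ n < 1) :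
    prepare_ngram_data_alt sentences word_to_index n =
      sentences.flatMap (fun sentence =>
        let idx := sentence.map (fun word => pvWordIdx word_to_index word)
        pvEmit (idx.take (n - 1).toNat) (idx.drop (n - 1).toNat)) := by
  unfold prepare_ngram_data_alt
  rw [if_neg hn]
  exact (pv_B_fold word_to_index n sentences []).trans (List.nil_append _)

-- ===== VERDICT (by name: the statement is the Claim_ definition above) =====
theorem prepare_ngram_data_spec : Claim_unchanged_prepare_ngram_data := by
  intro sentences word_to_index n _ _
  unfold Spec_prepare_ngram_data
  intro hD
  by_cases hn : n < 1
  · have hs : sentences = [] := by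
      by_contra hne
      exact hD ⟨by omega, hne⟩
    subst hs
    simp [prepare_ngram_data, prepare_ngram_data_alt, hn]
  · rw [pv_A_flatMap, pv_B_flatMap sentences word_to_index n hn]
    exact congrArg (fun f => List.flatMap f sentences)
      (funext fun s => (pv_sentence (s.map (fun word => pvWordIdx word_to_index word)) n (by omega)).symm)

theorem prepare_ngram_data_changed : Claim_changed_prepare_ngram_data := by
  unfold Claim_changed_prepare_ngram_data; decide

theorem prepare_ngram_data_tight : Claim_exact_prepare_ngram_data := by
  intro sentences word_to_index n _ hpre hD
  obtain ⟨hn, hne⟩ := hD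
  obtain ⟨_, hp2⟩ := hpre
  cases sentences with
  | nil => exact absurd rfl hne
  | cons s0 rest =>
    have hB : prepare_ngram_data_alt (s0 :: rest) word_to_index n = [] := by
      unfold prepare_ngram_data_alt
      rw [if_pos (by omega)]
    rw [hB, pv_A_flatMap]
    have hlen0 : -n < (s0.length : Int) := hp2 s0 (by simp)
    intro hcontra
    rw [List.flatMap_cons, List.append_eq_nil_iff] at hcontra
    have hc1 := hcontra.1
    unfold pvGA at hc1
    have hidx : ((s0.map (fun word => pvWordIdx word_to_index word)).length : Int) = (s0.length : Int) := by
      simp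
    rw [if_neg (by omega)] at hc1
    rw [List.map_eq_nil_iff] at hc1
    have hlenr := PySem.List.length_pyRange_one (n - 1)
      (((s0.map (fun word => pvWordIdx word_to_index word)).length : Int))
    rw [hc1] at hlenr
    simp at hlenr
    omega
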